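-- pv_equiv track=rewrite | github.com/Carolinecasey17/Thesis_NLP_GenderBias_AustralianJobDescriptions | official.scraperscript.py | get_file_names
-- ===== SOURCE A (Python) =====
-- def get_file_names(industries, locations):
--
--     """Function combines previously saved .csv files for a location and industry into one file
--     industries and locations need to be from the lists of lists used for searching"""
--
--     filenames = []
--
--     for industry in industries:
--
--         for location in locations:
--
--             location_string = location[0].lower()
--
--             industry_string = industry[0]
--             for term in industry[1:]:
--                 industry_string = industry_string + term
--
--             filename = industry_string + "_" + location_string + ".csv"
--             filenames.append(filename)
--
--     return filenames
-- ===== SOURCE B (Python) =====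
-- def get_file_names(industries, locations):
--     """Flat single loop over a combined index: precompute the joined industry
--     names and lowered locations once, then the k-th filename comes from
--     divmod(k, len(locations)) instead of nested loops."""
--     names = [''.join(ind) for ind in industries]
--     locs = [loc[0].lower() for loc in locations]
--     n = len(locs)
--     return [names[k // n] + "_" + locs[k % n] + ".csv" for k in range(len(names) * n)]
-- ===== Notes on version B (the rewrite author's own statement) =====
-- stated objective: alternative
-- what changed: B replaces A's nested loops (which rebuild the industry string inside every location iteration) with two precomputing map passes plus one flat loop over a single combined index k in range(len(industries)*len(locations)), recovering the pair via k//n and k%n; the join is computed once per industry instead of once per (industry,location).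
-- outside the precondition, e.g. on get_file_names([], [[]]): A returns [], B raises IndexError
import Mathlib
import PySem

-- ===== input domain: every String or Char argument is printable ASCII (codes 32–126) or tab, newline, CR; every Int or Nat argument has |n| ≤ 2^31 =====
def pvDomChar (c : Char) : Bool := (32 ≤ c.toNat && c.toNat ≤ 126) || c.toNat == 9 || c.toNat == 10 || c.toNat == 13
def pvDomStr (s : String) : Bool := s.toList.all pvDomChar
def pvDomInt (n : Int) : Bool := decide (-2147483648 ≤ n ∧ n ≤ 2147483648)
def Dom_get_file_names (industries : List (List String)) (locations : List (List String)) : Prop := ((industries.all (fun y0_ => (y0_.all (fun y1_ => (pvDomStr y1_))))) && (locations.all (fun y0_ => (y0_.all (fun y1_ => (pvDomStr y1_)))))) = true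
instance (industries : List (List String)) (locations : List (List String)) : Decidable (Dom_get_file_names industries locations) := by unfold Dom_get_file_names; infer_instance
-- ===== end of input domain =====

-- B precomputes the joined industry names and lowered locations once, then emits the
-- filenames in one flat loop over a combined index (divmod) instead of A's nested loops.


-- ===== PORT A =====
def get_file_names (industries : List (List String)) (locations : List (List String)) : List String :=
  industries.foldl (fun filenames industry =>
    locations.foldl (fun filenames location =>
      let location_string := PySem.Str.lower (PySem.List.pyGetD location 0 "")   -- location[0].lower(); in range under Pre_
      let industry_string := PySem.List.pyGetD industry 0 ""                      -- industry[0]; in range under Pre_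
      let industry_string := (PySem.List.slice industry (some 1) none).foldl
        (fun industry_string term => industry_string ++ term) industry_string     -- for term in industry[1:]
      let filename := industry_string ++ "_" ++ location_string ++ ".csv"
      filenames ++ [filename]) filenames) []

-- ===== PORT B =====
def get_file_names_alt (industries : List (List String)) (locations : List (List String)) : List String :=
  let names := industries.map (fun ind => PySem.Str.join "" ind)
  let locs := locations.map (fun loc => PySem.Str.lower (PySem.List.pyGetD loc 0 ""))   -- loc[0].lower(); in range under Pre_
  let n : Int := locs.length
  (PySem.List.pyRange 0 ((names.length : Int) * n) 1).map (fun k =>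
    PySem.List.pyGetD names (PySem.Int.floordiv k n) "" ++ "_" ++
    PySem.List.pyGetD locs (PySem.Int.mod k n) "" ++ ".csv")

-- ===== PRECONDITION & SPEC =====
-- Pre_ excludes inputs containing an empty inner list: A raises IndexError on them whenever both
-- outer lists are nonempty, and in the degenerate case industries == [] with an empty location
-- A returns [] while B's location pass raises, so the corner is excluded rather than matched.
def Pre_get_file_names (industries : List (List String)) (locations : List (List String)) : Prop :=
  (∀ loc ∈ locations, loc ≠ []) ∧ (locations = [] ∨ ∀ ind ∈ industries, ind ≠ [])
instance (industries : List (List String)) (locations : List (List String)) : Decidable (Pre_get_file_names industries locations) := by unfold Pre_get_file_names; infer_instance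
def pvWitness_get_file_names : List (List String) × List (List String) := ([["Mining", " Oil"]], [["Sydney"]])

def Spec_get_file_names (industries : List (List String)) (locations : List (List String)) (out : List String) : Prop := out = get_file_names_alt industries locations
instance (industries : List (List String)) (locations : List (List String)) (out : List String) : Decidable (Spec_get_file_names industries locations out) := by unfold Spec_get_file_names; infer_instance

-- ===== CLAIM (what is proved, stated in full; the proofs are below) =====
def Claim_equal_get_file_names : Prop := ∀ (industries : List (List String)) (locations : List (List String)), Dom_get_file_names industries locations → Pre_get_file_names industries locations → Spec_get_file_names industries locations (get_file_names industries locations)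

-- ===== LEMMAS AND PROOFS =====

-- join with empty separator peels the head off.
lemma chars_join_nil_cons (x : List Char) (l : List (List Char)) :
    PySem.Chars.join [] (x :: l) = x ++ PySem.Chars.join [] l := by
  cases l with
  | nil => simp [PySem.Chars.join_singleton, PySem.Chars.join_nil]
  | cons y ys => simp [PySem.Chars.join_cons_cons]

-- ''.join over a nonempty list equals A's head-then-fold concatenation.
lemma join_empty_eq_foldl (h : String) (t : List String) :
    PySem.Str.join "" (h :: t) = t.foldl (fun a b => a ++ b) h := by
  induction t generalizing h with
  | nil => simp [PySem.Str.join, PySem.Chars.join_singleton]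
  | cons b t ih =>
    rw [List.foldl_cons, ← ih (h ++ b)]
    simp only [PySem.Str.join]
    apply String.toList_injective
    simp [chars_join_nil_cons, List.append_assoc]

-- A's per-(industry,location) filename equals B's, for a nonempty industry.
lemma filename_eq (ind : List String) (hind : ind ≠ []) (loc : List String) :
    ((PySem.List.slice ind (some 1) none).foldl (fun a b => a ++ b) (PySem.List.pyGetD ind 0 ""))
      ++ "_" ++ PySem.Str.lower (PySem.List.pyGetD loc 0 "") ++ ".csv"
    = PySem.Str.join "" ind ++ "_" ++ PySem.Str.lower (PySem.List.pyGetD loc 0 "") ++ ".csv" := by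
  obtain ⟨h, t, rfl⟩ := List.exists_cons_of_ne_nil hind
  rw [PySem.List.slice_from_one]
  simp only [List.tail_cons, PySem.List.pyGetD_zero_cons]
  rw [join_empty_eq_foldl]

-- mapping g over positional lookups along range recovers ys.map g.
lemma map_range_getD {α γ : Type} (ys : List α) (d : α) (g : α → γ) :
    (List.range ys.length).map (fun k => g (ys.getD k d)) = ys.map g := by
  apply List.ext_getElem
  · simp
  · intro i h1 h2
    simp only [List.length_map] at h2
    simp [List.getD, List.getElem?_eq_getElem h2]

-- get_file_names_alt with its lets zeta-reduced (definitional).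
lemma alt_unfold (industries : List (List String)) (locations : List (List String)) :
    get_file_names_alt industries locations =
    (PySem.List.pyRange 0
        (((industries.map (fun ind => PySem.Str.join "" ind)).length : Int) *
         ((locations.map (fun loc => PySem.Str.lower (PySem.List.pyGetD loc 0 ""))).length : Int)) 1).map
      (fun k =>
        PySem.List.pyGetD (industries.map (fun ind => PySem.Str.join "" ind))
          (PySem.Int.floordiv k ((locations.map (fun loc => PySem.Str.lower (PySem.List.pyGetD loc 0 ""))).length : Int)) "" ++ "_" ++
        PySem.List.pyGetD (locations.map (fun loc => PySem.Str.lower (PySem.List.pyGetD loc 0 "")))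
          (PySem.Int.mod k ((locations.map (fun loc => PySem.Str.lower (PySem.List.pyGetD loc 0 ""))).length : Int)) "" ++ ".csv") := rfl

-- Nat core of B's flat index loop: a single range over m*n with divmod indexing is the product.
lemma nat_range_prod {α β γ : Type} (f : α → β → γ) (da : α) (db : β)
    (xs : List α) (ys : List β) (hn : 0 < ys.length) :
    (List.range (xs.length * ys.length)).map
      (fun k => f (xs.getD (k / ys.length) da) (ys.getD (k % ys.length) db))
    = xs.flatMap (fun x => ys.map (f x)) := by
  induction xs with
  | nil => simp
  | cons x xs ih =>
    have hsplit : (x :: xs).length * ys.length = ys.length + xs.length * ys.length := by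
      simp [Nat.succ_mul, Nat.add_comm]
    rw [List.flatMap_cons, hsplit, List.range_add, List.map_append, List.map_map]
    have h1 : (List.range ys.length).map
        (fun k => f ((x :: xs).getD (k / ys.length) da) (ys.getD (k % ys.length) db))
        = ys.map (f x) := by
      rw [← map_range_getD ys db (f x)]
      apply List.map_congr_left
      intro k hk
      rw [List.mem_range] at hk
      rw [Nat.div_eq_of_lt hk, Nat.mod_eq_of_lt hk]
      rfl
    have h2 : (List.range (xs.length * ys.length)).map
        ((fun k => f ((x :: xs).getD (k / ys.length) da) (ys.getD (k % ys.length) db)) ∘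
          (fun k => ys.length + k))
        = xs.flatMap (fun x => ys.map (f x)) := by
      rw [← ih]
      apply List.map_congr_left
      intro k _
      simp only [Function.comp]
      rw [Nat.add_div_left k hn, Nat.add_mod_left]
      rfl
    rw [h1, h2]

theorem get_file_names_spec : Claim_equal_get_file_names := by
  intro industries locations _ hpre
  unfold Spec_get_file_names get_file_names
  rw [alt_unfold]
  obtain ⟨hloc, hcase⟩ := hpre
  rcases eq_or_ne locations [] with rfl | hLne
  · -- no locations: A's inner loop never runs, B's range is empty
    simp [PySem.List.pyRange_one_eq_nil]
  · have hind : ∀ ind ∈ industries, ind ≠ [] := by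
      rcases hcase with rfl | hind
      · exact absurd rfl hLne
      · exact hind
    -- A's nested foldl with accumulator pushed out = flatMap of maps
    have push : ∀ (acc : List String) (inds : List (List String)),
        (∀ i ∈ inds, i ≠ []) →
        inds.foldl (fun filenames industry =>
          locations.foldl (fun filenames location =>
            filenames ++ [((PySem.List.slice industry (some 1) none).foldl
                (fun a b => a ++ b) (PySem.List.pyGetD industry 0 ""))
              ++ "_" ++ PySem.Str.lower (PySem.List.pyGetD location 0 "") ++ ".csv"]) filenames) acc
        = acc ++ inds.flatMap (fun i =>
            locations.map (fun loc =>
              PySem.Str.join "" i ++ "_" ++ PySem.Str.lower (PySem.List.pyGetD loc 0 "") ++ ".csv")) := by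
      intro acc inds hinds
      induction inds generalizing acc with
      | nil => simp
      | cons j js ihj =>
        simp only [List.foldl_cons, List.flatMap_cons]
        rw [PySem.List.foldl_append_singleton_eq_map,
            ihj _ (fun i hi => hinds i (by simp [hi])), List.append_assoc]
        congr 2
        exact List.map_congr_left (fun loc _ => filename_eq j (hinds j (by simp)) loc)
    rw [push [] industries hind, List.nil_append]
    -- B's side: turn the Int range with divmod into the Nat core lemma
    have hn : 0 < locations.length := List.length_pos_of_ne_nil hLne
    have key := nat_range_prod (fun (i l : String) => i ++ "_" ++ l ++ ".csv") "" ""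
      (industries.map (fun ind => PySem.Str.join "" ind))
      (locations.map (fun loc => PySem.Str.lower (PySem.List.pyGetD loc 0 "")))
      (by simpa using hn)
    simp only [List.length_map] at key
    have hcast : (((industries.map (fun ind => PySem.Str.join "" ind)).length : Int) *
        ((locations.map (fun loc => PySem.Str.lower (PySem.List.pyGetD loc 0 ""))).length : Int))
        = ((industries.length * locations.length : Nat) : Int) := by
      simp
    rw [hcast, PySem.List.pyRange_zero_natCast, List.map_map]
    simp only [Function.comp_def, List.length_map, PySem.Int.floordiv_natCast,
      PySem.Int.mod_natCast, PySem.List.pyGetD_natCast]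
    rw [key, List.flatMap_map]
    simp [List.map_map, Function.comp_def]

-- ===== VERDICT (by name: the statement is the Claim_ definition above) =====
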